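-- pv_equiv track=rewrite | github.com/vipulsingh24/DSA | Problems/robot_clean_rooms.py | get_clean_area
-- ===== SOURCE A (Python) =====
-- def is_valid_cell(matrix, current_row, current_col, max_row, max_col):
--     if current_row < 0 or current_col < 0 or current_row >= max_row or current_col >= max_col \
--             or matrix[current_row][current_col] == "X":
--         return False
--     return True
--
-- def get_clean_area(matrix, r, c, cleaned_area, R, C, direction="r"):
--     if not is_valid_cell(matrix, r, c, R, C):
--         return 0
--
--     if cleaned_area[r][c] == 1:
--         return 0
--
--     count = 1
--     cleaned_area[r][c] = 1
--
--     if direction == "r":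
--         c = c + 1
--     elif direction == "d":
--         r = r + 1
--     elif direction == "l":
--         c = c - 1
--     elif direction == "u":
--         r = r - 1
--
--     if is_valid_cell(matrix, r, c, R, C):
--         count += get_clean_area(matrix, r, c, cleaned_area, R, C, direction=direction)
--     else:
--         if direction == "r":
--             direction = "d"
--             r += 1
--             c -= 1
--         elif direction == "d":
--             direction = "l"
--             r -= 1
--             c -= 1
--         elif direction == "l":
--             direction = "u"
--             c += 1
--             r -= 1
--         elif direction == "u":
--             direction = "r"
--             r += 1
--             c += 1
--         count += get_clean_area(matrix, r, c, cleaned_area, R, C, direction=direction)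
--
--     return count
-- ===== SOURCE B (Python) =====
-- def is_valid_cell(matrix, current_row, current_col, max_row, max_col):
--     if current_row < 0 or current_col < 0 or current_row >= max_row or current_col >= max_col \
--             or matrix[current_row][current_col] == "X":
--         return False
--     return True
--
-- def _delta(direction):
--     if direction == "r":
--         return (0, 1)
--     if direction == "d":
--         return (1, 0)
--     if direction == "l":
--         return (0, -1)
--     if direction == "u":
--         return (-1, 0)
--     return (0, 0)
--
-- def _rotate(direction):
--     if direction == "r":
--         return "d"
--     if direction == "d":
--         return "l"
--     if direction == "l":
--         return "u"
--     if direction == "u":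
--         return "r"
--     return direction
--
-- def get_clean_area(matrix, r, c, cleaned_area, R, C, direction="r"):
--     count = 0
--     while is_valid_cell(matrix, r, c, R, C) and cleaned_area[r][c] != 1:
--         cleaned_area[r][c] = 1
--         count += 1
--         dr, dc = _delta(direction)
--         if is_valid_cell(matrix, r + dr, c + dc, R, C):
--             r, c = r + dr, c + dc
--         else:
--             direction = _rotate(direction)
--             dr, dc = _delta(direction)
--             r, c = r + dr, c + dc
--     return count
-- ===== Notes on version B (the rewrite author's own statement) =====
-- stated objective: simpler
-- what changed: Replaces A's self-recursive spiral walk (count = 1 + recursive call, with rotate-then-undo offset arithmetic) by a single iterative while-loop over an (r, c, direction, count) state with small move/rotate helper functions.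
-- outside the precondition, e.g. on get_clean_area([['X']], 0, 0, [], 1, 2, 'r'): A returns 0, B returns 0
import Mathlib
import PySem

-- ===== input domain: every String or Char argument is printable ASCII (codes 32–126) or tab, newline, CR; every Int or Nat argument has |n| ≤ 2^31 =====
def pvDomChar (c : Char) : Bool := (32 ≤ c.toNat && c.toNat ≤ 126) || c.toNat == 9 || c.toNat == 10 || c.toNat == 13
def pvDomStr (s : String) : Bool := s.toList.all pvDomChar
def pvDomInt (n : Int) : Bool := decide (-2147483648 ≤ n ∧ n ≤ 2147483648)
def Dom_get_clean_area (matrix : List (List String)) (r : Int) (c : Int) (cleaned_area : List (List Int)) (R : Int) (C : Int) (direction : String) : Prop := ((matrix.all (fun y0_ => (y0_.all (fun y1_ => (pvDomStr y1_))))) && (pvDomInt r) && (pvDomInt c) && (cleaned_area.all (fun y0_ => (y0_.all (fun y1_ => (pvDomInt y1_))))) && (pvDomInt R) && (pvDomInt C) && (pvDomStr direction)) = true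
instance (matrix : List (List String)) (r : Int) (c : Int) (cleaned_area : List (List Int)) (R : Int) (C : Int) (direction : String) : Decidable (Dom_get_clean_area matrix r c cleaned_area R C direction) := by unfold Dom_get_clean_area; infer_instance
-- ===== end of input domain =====

-- B replaces A's self-recursive spiral walk by an iterative while-loop with an (r,c,direction,count)
-- state and table-driven moves/rotations (objective: simpler). Both A and B mutate cleaned_area in
-- place identically; the equivalence proved here is about the return value.

-- ===== PORT A =====
-- shared helper: Python's is_valid_cell (identical in Source A and Source B)
def isValidCell (matrix : List (List String)) (cr cc R C : Int) : Bool :=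
  if cr < 0 || cc < 0 || cr ≥ R || cc ≥ C then false
  else match PySem.List.pyGet? matrix cr with
    | none => false            -- Python raises IndexError here; excluded by Pre_
    | some row => match PySem.List.pyGet? row cc with
      | none => false          -- Python raises IndexError here; excluded by Pre_
      | some s => !(s == "X")

-- cleaned_area[r][c] (read); none = Python IndexError, excluded by Pre_
def pvReadCell (ca : List (List Int)) (r c : Int) : Option Int :=
  match PySem.List.pyGet? ca r with
  | none => none
  | some row => PySem.List.pyGet? row c

-- cleaned_area[r][c] = 1 (only ever applied with 0 ≤ r, 0 ≤ c in range)
def pvSetCell (ca : List (List Int)) (r c : Int) : List (List Int) :=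
  match PySem.List.pyGet? ca r with
  | none => ca
  | some row => ca.set r.toNat (row.set c.toNat 1)

-- totality fuel shared by both ports: each recursive call / loop iteration turns one non-1 entry
-- of cleaned_area into 1, so this bound is never exhausted before the natural exit
def pvFuel (ca : List (List Int)) : Nat :=
  (ca.map (fun row => (row.filter (fun v => !(v == 1))).length)).sum + 1

-- A's recursion, step for step
def goA (fuel : Nat) (matrix : List (List String)) (r c : Int) (ca : List (List Int))
    (R C : Int) (dir : String) : Int :=
  match fuel with
  | 0 => 0
  | fuel + 1 =>
    if !(isValidCell matrix r c R C) then 0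
    else
      match pvReadCell ca r c with
      | none => 0              -- Python raises IndexError here; excluded by Pre_
      | some v =>
        if v == 1 then 0
        else
          let ca' := pvSetCell ca r c
          let rc :=
            if dir == "r" then (r, c + 1)
            else if dir == "d" then (r + 1, c)
            else if dir == "l" then (r, c - 1)
            else if dir == "u" then (r - 1, c)
            else (r, c)
          if isValidCell matrix rc.1 rc.2 R C then
            1 + goA fuel matrix rc.1 rc.2 ca' R C dir
          else
            let s :=
              if dir == "r" then ("d", rc.1 + 1, rc.2 - 1)
              else if dir == "d" then ("l", rc.1 - 1, rc.2 - 1)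
              else if dir == "l" then ("u", rc.1 - 1, rc.2 + 1)
              else if dir == "u" then ("r", rc.1 + 1, rc.2 + 1)
              else (dir, rc.1, rc.2)
            1 + goA fuel matrix s.2.1 s.2.2 ca' R C s.1

def get_clean_area (matrix : List (List String)) (r : Int) (c : Int) (cleaned_area : List (List Int)) (R : Int) (C : Int) (direction : String) : Int :=
  goA (pvFuel cleaned_area) matrix r c cleaned_area R C direction

-- ===== PORT B =====
def pvDelta (dir : String) : Int × Int :=
  if dir == "r" then (0, 1)
  else if dir == "d" then (1, 0)
  else if dir == "l" then (0, -1)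
  else if dir == "u" then (-1, 0)
  else (0, 0)

def pvRot (dir : String) : String :=
  if dir == "r" then "d"
  else if dir == "d" then "l"
  else if dir == "l" then "u"
  else if dir == "u" then "r"
  else dir

-- B's while-loop with accumulator, step for step
def goB (fuel : Nat) (matrix : List (List String)) (r c : Int) (ca : List (List Int))
    (R C : Int) (dir : String) (count : Int) : Int :=
  match fuel with
  | 0 => count
  | fuel + 1 =>
    if isValidCell matrix r c R C then
      match pvReadCell ca r c with
      | none => count          -- Python raises IndexError here; excluded by Pre_
      | some v =>
        if !(v == 1) then
          let ca' := pvSetCell ca r c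
          let d := pvDelta dir
          if isValidCell matrix (r + d.1) (c + d.2) R C then
            goB fuel matrix (r + d.1) (c + d.2) ca' R C dir (count + 1)
          else
            let dir' := pvRot dir
            let d' := pvDelta dir'
            goB fuel matrix (r + d'.1) (c + d'.2) ca' R C dir' (count + 1)
        else count
    else count

def get_clean_area_alt (matrix : List (List String)) (r : Int) (c : Int) (cleaned_area : List (List Int)) (R : Int) (C : Int) (direction : String) : Int :=
  goB (pvFuel cleaned_area) matrix r c cleaned_area R C direction 0

-- ===== PRECONDITION & SPEC =====
-- Pre_ excludes inputs on which the walk can raise IndexError: a start inside the R×C scan box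
-- while matrix or cleaned_area do not cover that box. It necessarily also excludes a few inputs
-- where A stops before ever indexing out of range (there A returns 0 and B agrees).
def Pre_get_clean_area (matrix : List (List String)) (r : Int) (c : Int) (cleaned_area : List (List Int)) (R : Int) (C : Int) (direction : String) : Prop :=
  ¬(0 ≤ r ∧ r < R ∧ 0 ≤ c ∧ c < C) ∨
    (R ≤ (matrix.length : Int) ∧ R ≤ (cleaned_area.length : Int) ∧
     (∀ row ∈ matrix, C ≤ (row.length : Int)) ∧ (∀ row ∈ cleaned_area, C ≤ (row.length : Int)))
instance (matrix : List (List String)) (r : Int) (c : Int) (cleaned_area : List (List Int)) (R : Int) (C : Int) (direction : String) : Decidable (Pre_get_clean_area matrix r c cleaned_area R C direction) := by unfold Pre_get_clean_area; infer_instance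

def pvWitness_get_clean_area : List (List String) × Int × Int × List (List Int) × Int × Int × String :=
  ([[".", "."], [".", "X"]], 0, 0, [[0, 0], [0, 0]], 2, 2, "r")

def Spec_get_clean_area (matrix : List (List String)) (r : Int) (c : Int) (cleaned_area : List (List Int)) (R : Int) (C : Int) (direction : String) (out : Int) : Prop := out = get_clean_area_alt matrix r c cleaned_area R C direction
instance (matrix : List (List String)) (r : Int) (c : Int) (cleaned_area : List (List Int)) (R : Int) (C : Int) (direction : String) (out : Int) : Decidable (Spec_get_clean_area matrix r c cleaned_area R C direction out) := by unfold Spec_get_clean_area; infer_instance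

-- ===== CLAIM (what is proved, stated in full; the proofs are below) =====
def Claim_equal_get_clean_area : Prop := ∀ (matrix : List (List String)) (r : Int) (c : Int) (cleaned_area : List (List Int)) (R : Int) (C : Int) (direction : String), Dom_get_clean_area matrix r c cleaned_area R C direction → Pre_get_clean_area matrix r c cleaned_area R C direction → Spec_get_clean_area matrix r c cleaned_area R C direction (get_clean_area matrix r c cleaned_area R C direction)

-- ===== LEMMAS AND PROOFS =====
-- main invariant: B's accumulator loop computes acc + A's recursion, for every state and any fuel
theorem goB_eq_acc_add_goA (fuel : Nat) :
    ∀ (matrix : List (List String)) (r c : Int) (ca : List (List Int)) (R C : Int)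
      (dir : String) (acc : Int),
      goB fuel matrix r c ca R C dir acc = acc + goA fuel matrix r c ca R C dir := by
  induction fuel with
  | zero => intro _ _ _ _ _ _ _ _; simp [goA, goB]
  | succ n ih =>
    intro matrix r c ca R C dir acc
    simp only [goA, goB]
    by_cases hv : isValidCell matrix r c R C
    · simp only [hv, if_true, Bool.not_true, Bool.false_eq_true, if_false]
      cases hr : pvReadCell ca r c with
      | none => simp
      | some v =>
        by_cases h1 : v = 1
        · simp [h1]
        · have hb : (v == 1) = false := by simp [h1]
          simp only [hb, Bool.not_false, if_true, Bool.false_eq_true, if_false]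
          by_cases hd1 : dir = "r"
          · subst hd1
            rw [show pvDelta "r" = ((0:Int), (1:Int)) from rfl,
                show pvRot "r" = "d" from rfl,
                show pvDelta "d" = ((1:Int), (0:Int)) from rfl]
            simp only [show (("r" : String) == "r") = true from rfl, if_true]
            norm_num
            simp only [ih]
            ring_nf
            split_ifs <;> ring_nf
          · by_cases hd2 : dir = "d"
            · subst hd2
              rw [show pvDelta "d" = ((1:Int), (0:Int)) from rfl,
                  show pvRot "d" = "l" from rfl,
                  show pvDelta "l" = ((0:Int), (-1:Int)) from rfl]
              simp only [show (("d" : String) == "r") = false from rfl,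
                show (("d" : String) == "d") = true from rfl, if_true, if_false,
                Bool.false_eq_true]
              norm_num
              simp only [ih]
              ring_nf
              split_ifs <;> ring_nf
            · by_cases hd3 : dir = "l"
              · subst hd3
                rw [show pvDelta "l" = ((0:Int), (-1:Int)) from rfl,
                    show pvRot "l" = "u" from rfl,
                    show pvDelta "u" = ((-1:Int), (0:Int)) from rfl]
                simp only [show (("l" : String) == "r") = false from rfl,
                  show (("l" : String) == "d") = false from rfl,
                  show (("l" : String) == "l") = true from rfl, if_true, if_false,
                  Bool.false_eq_true]
                norm_num
                simp only [ih]
                ring_nf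
                split_ifs <;> ring_nf
              · by_cases hd4 : dir = "u"
                · subst hd4
                  rw [show pvDelta "u" = ((-1:Int), (0:Int)) from rfl,
                      show pvRot "u" = "r" from rfl,
                      show pvDelta "r" = ((0:Int), (1:Int)) from rfl]
                  simp only [show (("u" : String) == "r") = false from rfl,
                    show (("u" : String) == "d") = false from rfl,
                    show (("u" : String) == "l") = false from rfl,
                    show (("u" : String) == "u") = true from rfl, if_true, if_false,
                    Bool.false_eq_true]
                  norm_num
                  simp only [ih]
                  ring_nf
                  split_ifs <;> ring_nf
                · have b1 : (dir == "r") = false := by simp [hd1]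
                  have b2 : (dir == "d") = false := by simp [hd2]
                  have b3 : (dir == "l") = false := by simp [hd3]
                  have b4 : (dir == "u") = false := by simp [hd4]
                  simp only [pvDelta, pvRot, b1, b2, b3, b4, if_false,
                    Bool.false_eq_true]
                  norm_num
                  simp only [ih]
                  ring_nf
    · simp [hv]

theorem get_clean_area_spec : Claim_equal_get_clean_area := by
  intro matrix r c ca R C dir _ _
  unfold Spec_get_clean_area get_clean_area get_clean_area_alt
  rw [goB_eq_acc_add_goA]
  ring
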